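-- pv_equiv track=rewrite | github.com/agenium-scale/nsimd | egg/gen_benches.py | sig_translate
-- ===== SOURCE A (Python) =====
-- def sig_replace_name(sig, name):
--     sig = sig.split(' ')
--     sig[1] = name
--     return ' '.join(sig)
--
-- def sig_translate(sig, translates, name=None):
--     sig = sig.split(' ')
--     ## Translates a given type to another
--     sig[0] = translates.get(sig[0], sig[0])
--     ## Do not use sig[1] (the function name)
--     for i, p in enumerate(sig[2:]):
--         sig[2 + i] = translates.get(p, p)
--     sig = ' '.join(sig)
--     ## Redefine name if available
--     if name:
--         sig = sig_replace_name(sig, name)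
--     return sig
-- ===== SOURCE B (Python) =====
-- def _emit(tok, idx, translates, name):
--     ## token 1 is the function name: replace it if a truthy name is given
--     if idx == 1:
--         return name if name else tok
--     return translates.get(tok, tok)
--
-- def sig_translate(sig, translates, name=None):
--     ## stream over the characters once: accumulate a word, flush it translated at each space
--     out = ''
--     word = ''
--     idx = 0
--     for ch in sig:
--         if ch == ' ':
--             out += _emit(word, idx, translates, name) + ' '
--             word = ''
--             idx += 1
--         else:
--             word += ch
--     return out + _emit(word, idx, translates, name)
-- ===== Notes on version B (the rewrite author's own statement) =====
-- stated objective: alternative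
-- what changed: B never splits or joins: it streams over the characters of sig once, accumulating the current word and flushing it (translated, or replaced by a truthy name at word index 1) into the output string at each space, whereas A materialises a token list, mutates it in place, joins, and then re-splits/re-joins in a helper to install the name.
-- intended difference: When name is truthy and the translation applied to the first token contains a space, A's re-split of the joined string shifts indices so A overwrites part of the translated return type with name, while B puts name in the function-name slot (token 1), which is the intended behaviour. — e.g. on sig_translate("a f b", [("a", "x y")], some "g"): A returns "x g f b", B returns "x y g b"
import Mathlib
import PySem

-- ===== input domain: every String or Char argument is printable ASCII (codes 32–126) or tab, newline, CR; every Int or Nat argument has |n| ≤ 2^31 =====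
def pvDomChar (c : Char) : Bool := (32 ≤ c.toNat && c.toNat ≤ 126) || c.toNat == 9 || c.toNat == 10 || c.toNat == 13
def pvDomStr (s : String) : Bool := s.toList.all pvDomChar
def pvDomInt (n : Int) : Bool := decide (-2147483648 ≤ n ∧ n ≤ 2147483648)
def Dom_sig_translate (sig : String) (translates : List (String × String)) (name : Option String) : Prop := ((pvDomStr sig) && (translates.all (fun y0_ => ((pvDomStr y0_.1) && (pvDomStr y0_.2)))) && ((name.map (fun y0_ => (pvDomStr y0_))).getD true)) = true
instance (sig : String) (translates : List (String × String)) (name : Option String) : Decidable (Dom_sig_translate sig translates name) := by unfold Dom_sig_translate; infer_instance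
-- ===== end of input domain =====

-- B replaces A's split→mutate→join→re-split→re-join flow (helper sig_replace_name) by a single
-- character-level streaming pass that flushes each completed word translated (or replaced by a
-- truthy name at word index 1) into the output; return value only.

-- ===== PORT A =====
def sig_replace_name (sig : String) (name : String) : String :=
  let parts := (PySem.Str.split? sig " ").getD []
  -- Python raises IndexError here when parts has fewer than 2 tokens; Pre_ excludes that
  PySem.Str.join " " (parts.set 1 name)

def sig_translate (sig : String) (translates : List (String × String)) (name : Option String) : String :=
  let parts := (PySem.Str.split? sig " ").getD []
  let parts := parts.set 0 (PySem.Dict.getD ⟨translates⟩ (parts.headD "") (parts.headD ""))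
  let parts := (PySem.List.enumerate (parts.drop 2) 0).foldl
      (fun acc ip => acc.set (2 + ip.1.toNat) (PySem.Dict.getD ⟨translates⟩ ip.2 ip.2)) parts
  let s := PySem.Str.join " " parts
  match name with
  | some nm => if nm ≠ "" then sig_replace_name s nm else s
  | none => s

-- ===== PORT B =====
-- helper _emit of Source B
def pvEmit (tok : String) (idx : Int) (translates : List (String × String)) (name : Option String) : String :=
  if idx = 1 then
    match name with
    | some nm => if nm ≠ "" then nm else tok
    | none => tok
  else PySem.Dict.getD ⟨translates⟩ tok tok

def sig_translate_alt (sig : String) (translates : List (String × String)) (name : Option String) : String :=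
  -- state (out, word, idx) of Source B's single for-loop over the characters of sig
  let st := sig.toList.foldl
    (fun (st : List Char × List Char × Int) ch =>
      if ch = ' ' then
        (st.1 ++ (pvEmit (String.ofList st.2.1) st.2.2 translates name).toList ++ [' '], [], st.2.2 + 1)
      else (st.1, st.2.1 ++ [ch], st.2.2))
    ([], [], 0)
  String.ofList (st.1 ++ (pvEmit (String.ofList st.2.1) st.2.2 translates name).toList)

-- ===== PRECONDITION & SPEC =====
-- Pre_ excludes exactly the inputs where A raises IndexError: a truthy name with a space-free
-- sig whose translation is space-free too (the translated signature re-splits to a single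
-- token, so sig[1] = name is out of range).
def Pre_sig_translate (sig : String) (translates : List (String × String)) (name : Option String) : Prop :=
  name = none ∨ name = some "" ∨ ' ' ∈ sig.toList ∨
    ' ' ∈ (PySem.Dict.getD ⟨translates⟩ sig sig).toList
instance (sig : String) (translates : List (String × String)) (name : Option String) : Decidable (Pre_sig_translate sig translates name) := by unfold Pre_sig_translate; infer_instance

def pvWitness_sig_translate : String × (List (String × String)) × Option String :=
  ("int f x", [("int", "i32")], none)

-- When name is truthy and the translation applied to the first token contains a space, A's
-- re-split of the joined string shifts indices so A overwrites part of the translated return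
-- type with name, while B puts name in the function-name slot (token 1), which is the
-- intended behaviour.
def D_sig_translate (sig : String) (translates : List (String × String)) (name : Option String) : Prop :=
  (name.getD "" ≠ "") ∧
  (let t0 := ((PySem.Str.split? sig " ").getD []).headD ""
   ' ' ∈ (PySem.Dict.getD ⟨translates⟩ t0 t0).toList)
instance (sig : String) (translates : List (String × String)) (name : Option String) : Decidable (D_sig_translate sig translates name) := by unfold D_sig_translate; infer_instance

def Spec_sig_translate (sig : String) (translates : List (String × String)) (name : Option String) (out : String) : Prop :=
  ¬ D_sig_translate sig translates name → out = sig_translate_alt sig translates name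
instance (sig : String) (translates : List (String × String)) (name : Option String) (out : String) : Decidable (Spec_sig_translate sig translates name out) := by unfold Spec_sig_translate; infer_instance

def pvDiffWitness_sig_translate : String × (List (String × String)) × Option String :=
  ("a f b", [("a", "x y")], some "g")
def pvDiffWitnessOut_sig_translate : String × String := ("x g f b", "x y g b")

-- ===== CLAIM (what is proved, stated in full; the proofs are below) =====
def Claim_unchanged_sig_translate : Prop := ∀ (sig : String) (translates : List (String × String)) (name : Option String), Dom_sig_translate sig translates name → Pre_sig_translate sig translates name → Spec_sig_translate sig translates name (sig_translate sig translates name)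
def Claim_changed_sig_translate : Prop := Dom_sig_translate (pvDiffWitness_sig_translate.1) (pvDiffWitness_sig_translate.2.1) (pvDiffWitness_sig_translate.2.2) ∧ Pre_sig_translate (pvDiffWitness_sig_translate.1) (pvDiffWitness_sig_translate.2.1) (pvDiffWitness_sig_translate.2.2) ∧ D_sig_translate (pvDiffWitness_sig_translate.1) (pvDiffWitness_sig_translate.2.1) (pvDiffWitness_sig_translate.2.2) ∧ sig_translate (pvDiffWitness_sig_translate.1) (pvDiffWitness_sig_translate.2.1) (pvDiffWitness_sig_translate.2.2) = pvDiffWitnessOut_sig_translate.1 ∧ sig_translate_alt (pvDiffWitness_sig_translate.1) (pvDiffWitness_sig_translate.2.1) (pvDiffWitness_sig_translate.2.2) = pvDiffWitnessOut_sig_translate.2 ∧ pvDiffWitnessOut_sig_translate.1 ≠ pvDiffWitnessOut_sig_translate.2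

-- ===== LEMMAS AND PROOFS =====

def splitSp : List Char → List (List Char)
  | [] => [[]]
  | c :: cs =>
      if c = ' ' then [] :: splitSp cs
      else
        match splitSp cs with
        | [] => [[c]]
        | h :: t => (c :: h) :: t

theorem splitSp_ne_nil (cs : List Char) : splitSp cs ≠ [] := by
  induction cs with
  | nil => simp [splitSp]
  | cons c cs ih =>
      simp only [splitSp]
      split
      · simp
      · cases h : splitSp cs <;> simp

def mergeHead (pre : List Char) : List (List Char) → List (List Char)
  | [] => [pre]
  | h :: t => (pre ++ h) :: t

theorem go_eq_splitSp : ∀ (fuel : Nat) (l cur : List Char) (acc : List (List Char)),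
    l.length ≤ fuel →
    PySem.Chars.splitOn.go [' '] fuel l cur acc = acc.reverse ++ mergeHead cur.reverse (splitSp l) := by
  intro fuel
  induction fuel with
  | zero =>
      intro l cur acc h
      have : l = [] := by simpa using List.length_eq_zero_iff.mp (Nat.le_zero.mp h)
      subst this
      simp [PySem.Chars.splitOn.go, splitSp, mergeHead]
  | succ n ih =>
      intro l cur acc h
      cases l with
      | nil => simp [PySem.Chars.splitOn.go, splitSp, mergeHead]
      | cons c rest =>
          by_cases hc : c = ' '
          · subst hc
            rw [show PySem.Chars.splitOn.go [' '] (n+1) (' ' :: rest) cur acc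
                  = PySem.Chars.splitOn.go [' '] n rest [] (cur.reverse :: acc) by
              simp [PySem.Chars.splitOn.go, List.isPrefixOf]]
            rw [ih rest [] (cur.reverse :: acc) (by simpa using Nat.succ_le_succ_iff.mp h)]
            simp only [splitSp, if_pos]
            cases hs : splitSp rest with
            | nil => exact absurd hs (splitSp_ne_nil rest)
            | cons a b => simp [mergeHead]
          · have hpre2 : ([' '].isPrefixOf (c :: rest)) = false := by
              simpa [List.isPrefixOf] using fun h => hc h.symm
            rw [show PySem.Chars.splitOn.go [' '] (n+1) (c :: rest) cur acc
                  = PySem.Chars.splitOn.go [' '] n rest (c :: cur) acc by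
              simp [PySem.Chars.splitOn.go, hpre2]]
            rw [ih rest (c :: cur) acc (by simpa using Nat.succ_le_succ_iff.mp h)]
            simp only [splitSp, if_neg hc]
            cases hs : splitSp rest with
            | nil => exact absurd hs (splitSp_ne_nil rest)
            | cons a b => simp [mergeHead]

theorem splitOn_eq_splitSp (cs : List Char) : PySem.Chars.splitOn cs [' '] = splitSp cs := by
  rw [PySem.Chars.splitOn, go_eq_splitSp (cs.length + 1) cs [] [] (by omega)]
  cases hs : splitSp cs with
  | nil => exact absurd hs (splitSp_ne_nil cs)
  | cons a b => simp [mergeHead]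

theorem not_mem_of_mem_splitSp (cs : List Char) (t : List Char) (h : t ∈ splitSp cs) : ' ' ∉ t := by
  induction cs generalizing t with
  | nil => simp [splitSp] at h; simp [h]
  | cons c cs ih =>
      simp only [splitSp] at h
      by_cases hc : c = ' '
      · rw [if_pos hc] at h
        rcases List.mem_cons.mp h with h | h
        · simp [h]
        · exact ih t h
      · rw [if_neg hc] at h
        cases hs : splitSp cs with
        | nil => exact absurd hs (splitSp_ne_nil cs)
        | cons a b =>
            rw [hs] at h
            rcases List.mem_cons.mp h with h | h
            · subst h
              intro hm
              rcases List.mem_cons.mp hm with hm | hm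
              · exact hc hm.symm
              · exact ih a (hs ▸ List.mem_cons_self) hm
            · exact ih t (hs ▸ List.mem_cons_of_mem a h)

theorem two_le_length_splitSp (cs : List Char) (h : ' ' ∈ cs) : 2 ≤ (splitSp cs).length := by
  induction cs with
  | nil => simp at h
  | cons c cs ih =>
      simp only [splitSp]
      by_cases hc : c = ' '
      · rw [if_pos hc]
        have := splitSp_ne_nil cs
        cases hs : splitSp cs with
        | nil => exact absurd hs this
        | cons a b => simp
      · rw [if_neg hc]
        have hm : ' ' ∈ cs := by
          rcases List.mem_cons.mp h with h | h
          · exact absurd h.symm hc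
          · exact h
        cases hs : splitSp cs with
        | nil => exact absurd hs (splitSp_ne_nil cs)
        | cons a b =>
            have := ih hm
            rw [hs] at this
            simpa using this

theorem splitSp_of_not_mem (cs : List Char) (h : ' ' ∉ cs) : splitSp cs = [cs] := by
  induction cs with
  | nil => rfl
  | cons c cs ih =>
      have hc : c ≠ ' ' := fun hc => h (by rw [hc]; exact List.mem_cons_self)
      simp only [splitSp, ih (fun hm => h (List.mem_cons_of_mem c hm)), if_neg hc]

theorem splitSp_append_space (a rest : List Char) (h : ' ' ∉ a) :
    splitSp (a ++ ' ' :: rest) = a :: splitSp rest := by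
  induction a with
  | nil => simp [splitSp]
  | cons c cs ih =>
      have hc : c ≠ ' ' := fun hc => h (by rw [hc]; exact List.mem_cons_self)
      have hcs : ' ' ∉ cs := fun hm => h (List.mem_cons_of_mem c hm)
      simp only [List.cons_append, splitSp, if_neg hc, ih hcs]

theorem joinSp_splitSp (cs : List Char) : [' '].intercalate (splitSp cs) = cs := by
  induction cs with
  | nil => simp [splitSp, List.intercalate]
  | cons c cs ih =>
      simp only [splitSp]
      by_cases hc : c = ' '
      · subst hc
        rw [if_pos rfl]
        cases hs : splitSp cs with
        | nil => exact absurd hs (splitSp_ne_nil cs)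
        | cons a b =>
            rw [hs] at ih
            simpa [List.intercalate] using ih
      · rw [if_neg hc]
        cases hs : splitSp cs with
        | nil => exact absurd hs (splitSp_ne_nil cs)
        | cons a b =>
            rw [hs] at ih
            cases b with
            | nil => simpa [List.intercalate] using ih
            | cons x y =>
                simp only [List.intercalate] at ih ⊢
                simpa using ih

theorem strSplit_spec (s : String) :
    ∃ qs, PySem.Str.split? s " " = some qs ∧ qs.map String.toList = splitSp s.toList := by
  have h := PySem.Str.split?_map s " "
  have hsep : (" " : String).toList = [' '] := by decide
  rw [hsep, PySem.Chars.split?] at h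
  simp only [List.isEmpty_cons, Bool.false_eq_true, if_false] at h
  cases hq : PySem.Str.split? s " " with
  | none => rw [hq] at h; simp at h
  | some qs =>
      rw [hq] at h
      simp only [Option.map_some, Option.some.injEq] at h
      exact ⟨qs, rfl, h.trans (splitOn_eq_splitSp s.toList)⟩

theorem map_enum_of_two_le (g : Int × String → String) (f : String → String)
    (hg : ∀ i t, i ≠ 1 → g (i, t) = f t) :
    ∀ (rest : List String) (s : Int), 2 ≤ s →
    (PySem.List.enumerate rest s).map g = rest.map f := by
  intro rest
  induction rest with
  | nil => intro s _; simp [PySem.List.enumerate]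
  | cons x xs ih =>
      intro s hs
      rw [PySem.List.enumerate_cons]
      simp only [List.map_cons]
      rw [hg s x (by omega), ih (s + 1) (by omega)]

theorem foldl_set_enum (f : String → String) :
    ∀ (ys : List String) (s : Nat) (acc : List String), acc.drop (2 + s) = ys →
    (PySem.List.enumerate ys (s : Int)).foldl
        (fun a ip => a.set (2 + ip.1.toNat) (f ip.2)) acc
      = acc.take (2 + s) ++ ys.map f := by
  intro ys
  induction ys with
  | nil =>
      intro s acc h
      have hlen : acc.length ≤ 2 + s := by
        have := congrArg List.length h
        simp at this; omega
      simp [PySem.List.enumerate, List.take_of_length_le hlen]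
  | cons y ys ih =>
      intro s acc h
      have hlt : 2 + s < acc.length := by
        have := congrArg List.length h
        simp at this; omega
      rw [PySem.List.enumerate_cons]
      simp only [List.foldl_cons, Int.toNat_natCast]
      have hdrop : (acc.set (2 + s) (f y)).drop (2 + (s + 1)) = ys := by
        rw [List.drop_set_of_lt (by omega)]
        have : acc.drop (2 + (s + 1)) = (acc.drop (2 + s)).drop 1 := by
          rw [List.drop_drop]; ring_nf
        rw [this, h]; simp
      rw [show ((s : Int) + 1) = ((s + 1 : Nat) : Int) by push_cast; ring,
         ih (s + 1) (acc.set (2 + s) (f y)) hdrop]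
      have htake : (acc.set (2 + s) (f y)).take (2 + (s + 1)) = acc.take (2 + s) ++ [f y] := by
        rw [show 2 + (s + 1) = (2 + s) + 1 by ring, List.take_set,
            List.take_succ_eq_append_getElem hlt, List.set_append]
        simp [List.length_take_of_le (le_of_lt hlt)]
      rw [htake]
      simp

theorem Alist_cons (translates : List (String × String)) (h0 t1 : String) (rest : List String) :
    (PySem.List.enumerate ((h0 :: t1 :: rest).drop 2) 0).foldl
        (fun acc ip => acc.set (2 + ip.1.toNat) (PySem.Dict.getD ⟨translates⟩ ip.2 ip.2)) (h0 :: t1 :: rest)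
      = h0 :: t1 :: rest.map (fun t => PySem.Dict.getD ⟨translates⟩ t t) := by
  rw [show ((0:Int)) = ((0 : Nat) : Int) by norm_num,
      show (h0 :: t1 :: rest).drop 2 = rest from rfl,
      foldl_set_enum (fun t => PySem.Dict.getD ⟨translates⟩ t t) rest 0 (h0 :: t1 :: rest) (by simp)]
  rfl

-- B-side: the streamed scan, characterised token-by-token
def scanSpec (translates : List (String × String)) (name : Option String) :
    List (List Char) → Int → List Char
  | [], _ => []
  | [t], i => (pvEmit (String.ofList t) i translates name).toList
  | t :: t2 :: ts, i =>
      (pvEmit (String.ofList t) i translates name).toList ++ ' ' :: scanSpec translates name (t2 :: ts) (i + 1)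

-- proof-side names for Source B's loop body and final flush (defeq to the port's lambda)
def altStep (translates : List (String × String)) (name : Option String) :
    (List Char × List Char × Int) → Char → (List Char × List Char × Int) := fun st ch =>
  if ch = ' ' then
    (st.1 ++ (pvEmit (String.ofList st.2.1) st.2.2 translates name).toList ++ [' '], [], st.2.2 + 1)
  else (st.1, st.2.1 ++ [ch], st.2.2)

def altFinish (translates : List (String × String)) (name : Option String)
    (st : List Char × List Char × Int) : List Char :=
  st.1 ++ (pvEmit (String.ofList st.2.1) st.2.2 translates name).toList

theorem interc_cons (a : List Char) (t : List (List Char)) (h : t ≠ []) :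
    [' '].intercalate (a :: t) = a ++ ' ' :: [' '].intercalate t := by
  cases t with
  | nil => exact absurd rfl h
  | cons b u => simp [List.intercalate]

theorem scan_loop (translates : List (String × String)) (name : Option String) :
    ∀ (cs out word : List Char) (idx : Int),
    altFinish translates name (cs.foldl (altStep translates name) (out, word, idx))
      = out ++ scanSpec translates name (mergeHead word (splitSp cs)) idx := by
  intro cs
  induction cs with
  | nil =>
      intro out word idx
      simp [altFinish, splitSp, mergeHead, scanSpec]
  | cons c cs ih =>
      intro out word idx
      simp only [List.foldl_cons]
      by_cases hc : c = ' '
      · subst hc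
        rw [show altStep translates name (out, word, idx) ' '
              = (out ++ (pvEmit (String.ofList word) idx translates name).toList ++ [' '], [], idx + 1) from by
            simp [altStep]]
        rw [ih _ [] (idx + 1)]
        cases hs : splitSp cs with
        | nil => exact absurd hs (splitSp_ne_nil cs)
        | cons a b =>
            rw [show mergeHead [] (a :: b) = a :: b from by simp [mergeHead],
                show mergeHead word (splitSp (' ' :: cs)) = word :: a :: b from by
                  simp [splitSp, hs, mergeHead],
                show scanSpec translates name (word :: a :: b) idx
                  = (pvEmit (String.ofList word) idx translates name).toList
                      ++ ' ' :: scanSpec translates name (a :: b) (idx + 1) from rfl]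
            simp
      · rw [show altStep translates name (out, word, idx) c = (out, word ++ [c], idx) from by
            simp [altStep, hc]]
        rw [ih out (word ++ [c]) idx]
        simp only [splitSp, if_neg hc]
        cases hs : splitSp cs with
        | nil => exact absurd hs (splitSp_ne_nil cs)
        | cons a b => simp [mergeHead]

theorem scanSpec_join (translates : List (String × String)) (name : Option String) :
    ∀ (toks : List String) (i : Int), toks ≠ [] →
    scanSpec translates name (toks.map String.toList) i
      = (PySem.Str.join " " ((PySem.List.enumerate toks i).map
          (fun it => pvEmit it.2 it.1 translates name))).toList := by
  intro toks
  induction toks with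
  | nil => intro i h; exact absurd rfl h
  | cons t ts ih =>
      intro i _
      rw [PySem.List.enumerate_cons]
      cases ts with
      | nil =>
          simp [scanSpec, PySem.List.enumerate, PySem.Str.toList_join, PySem.Chars.join,
                List.intercalate, String.ofList_toList]
      | cons t2 ts2 =>
          simp only [List.map_cons, scanSpec, String.ofList_toList, List.map_cons] at *
          rw [ih (i + 1) (by simp)]
          rw [PySem.List.enumerate_cons]
          simp [PySem.Str.toList_join, PySem.Chars.join, List.intercalate]

-- B equals the name-aware translation of the token list, joined once
theorem alt_eq_join (sig : String) (translates : List (String × String)) (name : Option String)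
    (toks : List String)
    (htl : toks.map String.toList = splitSp sig.toList) :
    sig_translate_alt sig translates name
      = PySem.Str.join " " ((PySem.List.enumerate toks 0).map
          (fun it => pvEmit it.2 it.1 translates name)) := by
  have hne : toks ≠ [] := by
    intro h; rw [h] at htl; exact splitSp_ne_nil sig.toList (by simpa using htl.symm)
  show String.ofList (altFinish translates name
      (sig.toList.foldl (altStep translates name) ([], [], 0))) = _
  rw [scan_loop translates name sig.toList [] [] 0]
  cases hs : splitSp sig.toList with
  | nil => exact absurd hs (splitSp_ne_nil sig.toList)
  | cons a b =>
      simp only [mergeHead, List.nil_append]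
      rw [← hs, ← htl, scanSpec_join translates name toks 0 hne, String.ofList_toList]

-- A's sig_replace_name on a joined list whose first two tokens are space-free
theorem replace_name_join (T0 t1 : String) (R : List String) (nm : String)
    (h0 : ' ' ∉ T0.toList) (h1 : ' ' ∉ t1.toList) :
    sig_replace_name (PySem.Str.join " " (T0 :: t1 :: R)) nm
      = PySem.Str.join " " (T0 :: nm :: R) := by
  unfold sig_replace_name
  obtain ⟨qs, hq, hqs⟩ := strSplit_spec (PySem.Str.join " " (T0 :: t1 :: R))
  rw [hq, Option.getD_some]
  have hchars : (PySem.Str.join " " (T0 :: t1 :: R)).toList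
      = T0.toList ++ ' ' :: [' '].intercalate ((t1 :: R).map String.toList) := by
    rw [PySem.Str.toList_join]
    show [' '].intercalate ((T0 :: t1 :: R).map String.toList) = _
    simp [List.intercalate]
  rw [hchars] at hqs
  rw [splitSp_append_space T0.toList _ h0] at hqs
  cases R with
  | nil =>
      rw [show [' '].intercalate ((t1 :: []).map String.toList) = t1.toList by
            simp [List.intercalate],
          splitSp_of_not_mem t1.toList h1] at hqs
      have : qs = [T0, t1] := by
        cases qs with
        | nil => simp at hqs
        | cons x xs =>
            cases xs with
            | nil => simp at hqs
            | cons y ys =>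
                simp only [List.map_cons, List.cons.injEq, List.map_eq_nil_iff] at hqs
                rw [String.toList_inj.mp hqs.1, String.toList_inj.mp hqs.2.1, hqs.2.2]
      rw [this]
      rfl
  | cons r R' =>
      rw [show [' '].intercalate ((t1 :: r :: R').map String.toList)
            = t1.toList ++ ' ' :: [' '].intercalate ((r :: R').map String.toList) by
          simp [List.intercalate],
        splitSp_append_space t1.toList _ h1] at hqs
      cases qs with
      | nil => simp at hqs
      | cons x xs =>
          cases xs with
          | nil => simp at hqs
          | cons y ys =>
              simp only [List.map_cons, List.cons.injEq] at hqs
              obtain ⟨hx, hy, hys⟩ := hqs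
              have hysne : ys ≠ [] := by
                intro h
                rw [h] at hys
                exact splitSp_ne_nil _ (by simpa using hys.symm)
              rw [String.toList_inj.mp hx]
              apply String.toList_inj.mp
              rw [PySem.Str.toList_join, PySem.Str.toList_join]
              show [' '].intercalate ((T0 :: nm :: ys).map String.toList)
                    = [' '].intercalate ((T0 :: nm :: r :: R').map String.toList)
              simp only [List.map_cons]
              rw [interc_cons _ _ (by simp), interc_cons _ _ (by simpa using hysne),
                  interc_cons _ _ (by simp), interc_cons _ _ (by simp),
                  hys, joinSp_splitSp]

theorem Blist_cons (translates : List (String × String)) (name : Option String)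
    (t0 t1 : String) (rest : List String) :
    (PySem.List.enumerate (t0 :: t1 :: rest) 0).map
        (fun it => pvEmit it.2 it.1 translates name)
      = PySem.Dict.getD ⟨translates⟩ t0 t0 :: pvEmit t1 1 translates name ::
          rest.map (fun t => PySem.Dict.getD ⟨translates⟩ t t) := by
  rw [PySem.List.enumerate_cons, PySem.List.enumerate_cons]
  simp only [List.map_cons]
  rw [map_enum_of_two_le _ (fun t => PySem.Dict.getD ⟨translates⟩ t t)
        (by intro i t hi; simp [pvEmit, hi]) rest (0 + 1 + 1) (by omega)]
  norm_num [pvEmit]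

theorem sig_translate_main (sig : String) (translates : List (String × String)) (name : Option String)
    (hpre : Pre_sig_translate sig translates name)
    (hnd : ¬ D_sig_translate sig translates name) :
    sig_translate sig translates name = sig_translate_alt sig translates name := by
  obtain ⟨toks, hq, htl⟩ := strSplit_spec sig
  have hne : toks ≠ [] := by
    intro h; rw [h] at htl; exact splitSp_ne_nil sig.toList (by simpa using htl.symm)
  have htokfree : ∀ t ∈ toks, ' ' ∉ t.toList := by
    intro t ht
    exact not_mem_of_mem_splitSp sig.toList t.toList (htl ▸ List.mem_map_of_mem ht)
  have hlen2 : ' ' ∈ sig.toList → 2 ≤ toks.length := by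
    intro h
    have := two_le_length_splitSp sig.toList h
    rw [← htl] at this; simpa using this
  rw [alt_eq_join sig translates name toks htl]
  unfold sig_translate
  rw [hq]
  simp only [Option.getD_some]
  rcases name with _ | nm
  · -- name = None
    simp only
    rcases toks with _ | ⟨t0, _ | ⟨t1, rest⟩⟩
    · exact absurd rfl hne
    · simp [PySem.List.enumerate, pvEmit]
    · simp only [List.headD_cons, List.set_cons_zero]
      rw [Alist_cons, Blist_cons]
      simp [pvEmit]
  · by_cases hnm : nm = ""
    · -- name = Some "" is falsy
      subst hnm
      simp only [ne_eq, not_true_eq_false, if_false]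
      rcases toks with _ | ⟨t0, _ | ⟨t1, rest⟩⟩
      · exact absurd rfl hne
      · simp [PySem.List.enumerate, pvEmit]
      · simp only [List.headD_cons, List.set_cons_zero]
        rw [Alist_cons, Blist_cons]
        simp [pvEmit]
    · -- truthy name: Pre_ gives at least two tokens, ¬D_ a space-free first translation
      have hD0 : ' ' ∉ (PySem.Dict.getD ⟨translates⟩ (toks.headD "") (toks.headD "")).toList := by
        intro hmem
        exact hnd ⟨by simp [hnm], by rw [hq]; simpa using hmem⟩
      have hsp : ' ' ∈ sig.toList := by
        rcases hpre with h | h | h | h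
        · exact absurd h (by simp)
        · simp at h; exact absurd h hnm
        · exact h
        · by_contra hs
          rw [splitSp_of_not_mem sig.toList hs] at htl
          have htoks : toks = [sig] := by
            cases toks with
            | nil => exact absurd rfl hne
            | cons a l =>
                simp only [List.map_cons, List.cons.injEq, List.map_eq_nil_iff] at htl
                rw [String.toList_inj.mp htl.1, htl.2]
          rw [htoks] at hD0
          exact hD0 (by simpa using h)
      rcases toks with _ | ⟨t0, _ | ⟨t1, rest⟩⟩
      · exact absurd rfl hne
      · exact absurd (hlen2 hsp) (by simp)
      · simp only [List.headD_cons, List.set_cons_zero, if_pos (by simpa using hnm)]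
        rw [Alist_cons]
        rw [replace_name_join (PySem.Dict.getD ⟨translates⟩ t0 t0) t1
              (rest.map (fun t => PySem.Dict.getD ⟨translates⟩ t t)) nm
              (by simpa using hD0) (htokfree t1 (by simp))]
        rw [Blist_cons]
        simp [pvEmit, hnm]

-- ===== VERDICT (by name: the statement is the Claim_ definition above) =====
theorem sig_translate_spec : Claim_unchanged_sig_translate := by
  intro sig translates name _ hpre hnd
  exact sig_translate_main sig translates name hpre hnd

theorem sig_translate_changed : Claim_changed_sig_translate := by
  unfold Claim_changed_sig_translate; decide
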